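-- pv_equiv track=rewrite | github.com/eian-lee/coder_five | changmo/week2/디스크_컨트롤러.py | solution
-- ===== SOURCE A (Python) =====
-- import heapq
-- from collections import deque
--
-- REQUEST_TIME = 0
--
-- def solution(jobs):
--     answer = 0
--     N = len(jobs)
--     jobs.sort(key=lambda x:x[REQUEST_TIME])
--     jobs = deque(jobs)
--
--     wait_jobs = []
--     time = jobs[0][REQUEST_TIME]
--
--     while jobs or wait_jobs:
--         if not wait_jobs and jobs and time < jobs[0][REQUEST_TIME]:
--             time = jobs[0][REQUEST_TIME]
--
--         while jobs and jobs[0][REQUEST_TIME] <= time: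
--             start, duration = jobs.popleft()
--             heapq.heappush(wait_jobs, (duration, start))
--
--         duration, start = heapq.heappop(wait_jobs)
--         time += duration
--
--         answer += (time - start)
--
--     return answer // N
-- ===== SOURCE B (Python) =====
-- # B: same SJF result without heapq/deque: a cursor into the sorted list plus a
-- # released list scanned linearly for the (duration, start)-minimal job.
-- # Like A it sorts `jobs` in place (same observable mutation).
-- def solution(jobs):
--     jobs.sort(key=lambda x: x[0])
--     N = len(jobs)
--     time = jobs[0][0]
--     total = 0
--     i = 0
--     released = []
--     while i < N or released:
--         if not released and time < jobs[i][0]: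
--             time = jobs[i][0]
--         while i < N and jobs[i][0] <= time:
--             released.append(jobs[i])
--             i += 1
--         best = 0
--         for k in range(1, len(released)):
--             if (released[k][1], released[k][0]) < (released[best][1], released[best][0]):
--                 best = k
--         start, duration = released.pop(best)
--         time += duration
--         total += time - start
--     return total // N
-- ===== Notes on version B (the rewrite author's own statement) =====
-- stated objective: simpler
-- what changed: Replaces the deque + heapq priority queue with a plain cursor into the sorted list and a released list scanned linearly for the (duration, start)-minimal job, no imports needed.
import Mathlib
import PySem

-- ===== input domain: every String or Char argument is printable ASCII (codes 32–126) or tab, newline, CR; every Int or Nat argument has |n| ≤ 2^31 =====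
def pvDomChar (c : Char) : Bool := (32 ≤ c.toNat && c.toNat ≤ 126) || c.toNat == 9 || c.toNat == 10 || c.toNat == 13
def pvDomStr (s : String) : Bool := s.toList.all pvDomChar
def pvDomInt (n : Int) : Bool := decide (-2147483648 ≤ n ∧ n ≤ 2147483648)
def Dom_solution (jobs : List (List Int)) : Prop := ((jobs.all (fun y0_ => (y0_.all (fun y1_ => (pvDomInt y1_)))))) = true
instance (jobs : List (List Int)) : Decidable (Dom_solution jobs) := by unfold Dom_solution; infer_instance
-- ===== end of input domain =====

-- B replaces A's deque + heapq with a cursor into the sorted list and a linear min-scan of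
-- the released jobs (objective: simpler). Both Pythons sort `jobs` in place (the same
-- observable mutation); the equivalence proved here is about the return value.

-- ===== SHARED HELPERS (identical Python snippets in A and B) =====

/-- `start, duration = job` for a two-element job list (Pre_ guarantees length 2). -/
def pvToPair (j : List Int) : Int × Int := match j with | [s, d] => (s, d) | _ => (0, 0)

/-- `if <no waiting job> and <unfinished jobs remain> and time < jobs[i][0]: time = jobs[i][0]`
(identical lines in A and B; `q` is the not-yet-released part of the sorted list). -/
def pvT1 (q : List (List Int)) (noneWaiting : Bool) (time : Int) : Int :=
  match q, noneWaiting with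
  | j :: _, true => if time < PySem.List.pyGetD j 0 0 then PySem.List.pyGetD j 0 0 else time
  | _, _ => time

lemma pvTakeDrop_length (p : List Int → Bool) (q : List (List Int)) :
    (q.takeWhile p).length + (q.dropWhile p).length = q.length := by
  have h := List.takeWhile_append_dropWhile (p := p) (l := q)
  calc (q.takeWhile p).length + (q.dropWhile p).length
      = (q.takeWhile p ++ q.dropWhile p).length := (List.length_append).symm
    _ = q.length := by rw [h]

-- ===== PORT A =====

/-- the `(duration, start)` tuple order heapq compares, on `(start, duration)` job pairs -/
def pvHLe (a b : Int × Int) : Bool := a.2 < b.2 || (a.2 == b.2 && a.1 ≤ b.1)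

/-- `heapq.heappush(wait_jobs, (duration, start))`: the heap is modeled as a list kept
sorted by the `(duration, start)` key, so `heappop` = take the head = the minimum —
the popped values are the only thing A observes of the heap. -/
def pvHeapPush (a : Int × Int) : List (Int × Int) → List (Int × Int)
  | [] => [a]
  | b :: t => if pvHLe a b then a :: b :: t else b :: pvHeapPush a t

lemma pvHeapPush_length (a : Int × Int) (l : List (Int × Int)) :
    (pvHeapPush a l).length = l.length + 1 := by
  induction l with
  | nil => rfl
  | cons b t ih => by_cases h : pvHLe a b = true <;> simp [pvHeapPush, h, ih]

lemma pvFoldPush_length (ms : List (List Int)) (w : List (Int × Int)) :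
    (ms.foldl (fun h j => pvHeapPush (pvToPair j) h) w).length = w.length + ms.length := by
  induction ms generalizing w with
  | nil => rfl
  | cons j t ih => simp [List.foldl, ih, pvHeapPush_length]; omega

/-- the `while jobs or wait_jobs:` loop of A (deque `q`, heap `w`, `time`, `answer`) -/
def pvLoopA (q : List (List Int)) (w : List (Int × Int)) (time ans : Int) : Int :=
  if q = [] ∧ w = [] then ans
  else
    match hw : (q.takeWhile (fun j => PySem.List.pyGetD j 0 0 ≤ pvT1 q w.isEmpty time)).foldl
        (fun h j => pvHeapPush (pvToPair j) h) w with
    | [] => ans  -- unreachable: heappop of an empty heap would raise, the loop guard prevents it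
    | p :: w2 =>
      pvLoopA (q.dropWhile (fun j => PySem.List.pyGetD j 0 0 ≤ pvT1 q w.isEmpty time)) w2
        (pvT1 q w.isEmpty time + p.2)
        (ans + ((pvT1 q w.isEmpty time + p.2) - p.1))
termination_by q.length + w.length
decreasing_by
  have h1 := pvFoldPush_length
    (q.takeWhile (fun j => decide (PySem.List.pyGetD j 0 0 ≤ pvT1 q w.isEmpty time))) w
  rw [hw] at h1
  simp only [List.length_cons] at h1
  have h2 := pvTakeDrop_length
    (fun j => decide (PySem.List.pyGetD j 0 0 ≤ pvT1 q w.isEmpty time)) q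
  omega

def solution (jobs : List (List Int)) : Int :=
  let js := PySem.List.sorted jobs (fun j => PySem.List.pyGetD j 0 0)
  PySem.Int.floordiv
    (pvLoopA js [] (PySem.List.pyGetD (PySem.List.pyGetD js 0 []) 0 0) 0)
    (PySem.List.len jobs)

-- ===== PORT B =====

/-- the `best = …` min-scan plus `released.pop(best)`: returns the `(duration, start)`-minimal
released job (ties go to the earlier index, as Python's scan keeps the first minimum) and
the list without that occurrence. -/
def pvExtractMin : List (Int × Int) → (Int × Int) × List (Int × Int)
  | [] => ((0, 0), [])
  | [x] => (x, [])
  | x :: y :: t =>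
    let r := pvExtractMin (y :: t)
    if pvHLe x r.1 then (x, y :: t) else (r.1, x :: r.2)

lemma pvExtractMin_length (x : Int × Int) (t : List (Int × Int)) :
    ((pvExtractMin (x :: t)).2).length = t.length := by
  induction t generalizing x with
  | nil => rfl
  | cons y t ih =>
    by_cases h : pvHLe x (pvExtractMin (y :: t)).1 = true <;>
      simp [pvExtractMin, h, ih y]

/-- the `while i < N or released:` loop of B; the cursor `i` is carried as the remaining
suffix `pend` of the sorted list, `released` holds `(start, duration)` pairs -/
def pvLoopB (pend : List (List Int)) (rel : List (Int × Int)) (time ans : Int) : Int :=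
  if pend = [] ∧ rel = [] then ans
  else
    match hr : rel ++
        (pend.takeWhile (fun j => PySem.List.pyGetD j 0 0 ≤ pvT1 pend rel.isEmpty time)).map pvToPair with
    | [] => ans  -- unreachable: min() over an empty released list would raise
    | c :: cs =>
      pvLoopB (pend.dropWhile (fun j => PySem.List.pyGetD j 0 0 ≤ pvT1 pend rel.isEmpty time))
        (pvExtractMin (c :: cs)).2
        (pvT1 pend rel.isEmpty time + (pvExtractMin (c :: cs)).1.2)
        (ans + ((pvT1 pend rel.isEmpty time + (pvExtractMin (c :: cs)).1.2) - (pvExtractMin (c :: cs)).1.1))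
termination_by pend.length + rel.length
decreasing_by
  have h1 := pvExtractMin_length c cs
  have h2 := pvTakeDrop_length
    (fun j => decide (PySem.List.pyGetD j 0 0 ≤ pvT1 pend rel.isEmpty time)) pend
  have h3 : (rel ++
      (pend.takeWhile (fun j => decide (PySem.List.pyGetD j 0 0 ≤ pvT1 pend rel.isEmpty time))).map pvToPair).length
      = cs.length + 1 := by rw [hr]; simp
  simp only [List.length_append, List.length_map] at h3
  omega

def solution_alt (jobs : List (List Int)) : Int :=
  let js := PySem.List.sorted jobs (fun j => PySem.List.pyGetD j 0 0)
  PySem.Int.floordiv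
    (pvLoopB js [] (PySem.List.pyGetD (PySem.List.pyGetD js 0 []) 0 0) 0)
    (PySem.List.len jobs)

-- ===== PRECONDITION & SPEC =====
-- Pre_ excludes exactly where Python A raises: the empty list (IndexError on jobs[0])
-- and jobs that are not two-element lists (IndexError/ValueError on x[0] / unpacking).
def Pre_solution (jobs : List (List Int)) : Prop := jobs ≠ [] ∧ ∀ j ∈ jobs, j.length = 2
instance (jobs : List (List Int)) : Decidable (Pre_solution jobs) := by unfold Pre_solution; infer_instance
def pvWitness_solution : List (List Int) := [[0, 3], [1, 9], [2, 6]]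

def Spec_solution (jobs : List (List Int)) (out : Int) : Prop := out = solution_alt jobs
instance (jobs : List (List Int)) (out : Int) : Decidable (Spec_solution jobs out) := by unfold Spec_solution; infer_instance

-- ===== CLAIM (what is proved, stated in full; the proofs are below) =====
def Claim_equal_solution : Prop := ∀ (jobs : List (List Int)), Dom_solution jobs → Pre_solution jobs → Spec_solution jobs (solution jobs)

-- ===== LEMMAS AND PROOFS =====

lemma pvHLe_refl (a : Int × Int) : pvHLe a a = true := by simp [pvHLe]

lemma pvHLe_total {a b : Int × Int} (h : pvHLe a b = false) : pvHLe b a = true := by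
  simp [pvHLe] at *; omega

lemma pvHLe_antisymm {a b : Int × Int} (h1 : pvHLe a b = true) (h2 : pvHLe b a = true) : a = b := by
  obtain ⟨a1, a2⟩ := a; obtain ⟨b1, b2⟩ := b
  simp [pvHLe] at *
  constructor <;> omega

lemma pvHLe_trans {a b c : Int × Int} (h1 : pvHLe a b = true) (h2 : pvHLe b c = true) :
    pvHLe a c = true := by
  obtain ⟨a1, a2⟩ := a; obtain ⟨b1, b2⟩ := b; obtain ⟨c1, c2⟩ := c
  simp [pvHLe] at *; omega

lemma pvHeapPush_perm (a : Int × Int) (l : List (Int × Int)) :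
    (pvHeapPush a l).Perm (a :: l) := by
  induction l with
  | nil => rfl
  | cons b t ih =>
    by_cases h : pvHLe a b = true
    · simp [pvHeapPush, h]
    · simp only [pvHeapPush, h]
      exact (ih.cons b).trans (List.Perm.swap a b t)

lemma pvHeapPush_pairwise {a : Int × Int} {l : List (Int × Int)}
    (hl : l.Pairwise (fun x y => pvHLe x y = true)) :
    (pvHeapPush a l).Pairwise (fun x y => pvHLe x y = true) := by
  induction l with
  | nil => simp [pvHeapPush]
  | cons b t ih =>
    rw [List.pairwise_cons] at hl
    by_cases h : pvHLe a b = true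
    · simp only [pvHeapPush, h, if_pos]
      refine List.Pairwise.cons ?_ (List.Pairwise.cons hl.1 hl.2)
      intro y hy
      rcases List.mem_cons.mp hy with hy | hy
      · exact hy ▸ h
      · exact pvHLe_trans h (hl.1 _ hy)
    · simp only [pvHeapPush, h]
      refine List.Pairwise.cons ?_ (ih hl.2)
      intro y hy
      rcases List.mem_cons.mp ((pvHeapPush_perm a t).mem_iff.mp hy) with hy' | hy'
      · exact hy' ▸ pvHLe_total (by simpa using h)
      · exact hl.1 _ hy'

lemma pvFoldPush_perm (ms : List (List Int)) (w : List (Int × Int)) :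
    (ms.foldl (fun h j => pvHeapPush (pvToPair j) h) w).Perm (w ++ ms.map pvToPair) := by
  induction ms generalizing w with
  | nil => simp
  | cons j t ih =>
    exact (ih (pvHeapPush (pvToPair j) w)).trans
      (((pvHeapPush_perm (pvToPair j) w).append_right (t.map pvToPair)).trans
        List.perm_middle.symm)

lemma pvFoldPush_pairwise (ms : List (List Int)) {w : List (Int × Int)}
    (hw : w.Pairwise (fun x y => pvHLe x y = true)) :
    (ms.foldl (fun h j => pvHeapPush (pvToPair j) h) w).Pairwise (fun x y => pvHLe x y = true) := by
  induction ms generalizing w with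
  | nil => exact hw
  | cons j t ih => exact ih (pvHeapPush_pairwise hw)

lemma pvExtractMin_perm (x : Int × Int) (t : List (Int × Int)) :
    ((pvExtractMin (x :: t)).1 :: (pvExtractMin (x :: t)).2).Perm (x :: t) := by
  induction t generalizing x with
  | nil => rfl
  | cons y t ih =>
    by_cases h : pvHLe x (pvExtractMin (y :: t)).1 = true
    · simp [pvExtractMin, h]
    · simp only [pvExtractMin, h]
      exact (List.Perm.swap _ _ _).trans ((ih y).cons x)

lemma pvExtractMin_min (x : Int × Int) (t : List (Int × Int)) :
    ∀ z ∈ x :: t, pvHLe (pvExtractMin (x :: t)).1 z = true := by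
  induction t generalizing x with
  | nil =>
    intro z hz
    rcases List.mem_cons.mp hz with hz | hz
    · exact hz ▸ pvHLe_refl x
    · simp at hz
  | cons y t ih =>
    intro z hz
    by_cases h : pvHLe x (pvExtractMin (y :: t)).1 = true
    · simp only [pvExtractMin, h, if_pos]
      rcases List.mem_cons.mp hz with hz | hz
      · exact hz ▸ pvHLe_refl x
      · exact pvHLe_trans h (ih y _ hz)
    · simp only [pvExtractMin, h]
      rcases List.mem_cons.mp hz with hz | hz
      · rw [hz]; exact pvHLe_total (by simpa using h)
      · exact ih y _ hz

/-- Main invariant: A's heap `w` (a sorted list) and B's released list `rel` hold the same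
multiset of jobs, so each round pops the same job and the loops stay in lockstep. -/
lemma pvLoop_eq (n : Nat) : ∀ (q : List (List Int)) (w rel : List (Int × Int)) (t a : Int),
    q.length + w.length = n →
    w.Pairwise (fun x y => pvHLe x y = true) → w.Perm rel →
    pvLoopA q w t a = pvLoopB q rel t a := by
  induction n using Nat.strong_induction_on with
  | _ n IH =>
    intro q w rel t a hn hp hperm
    rw [pvLoopA.eq_def, pvLoopB.eq_def]
    by_cases hq0 : q = [] ∧ w = []
    · have hrel : rel = [] := by
        have := hperm.length_eq
        rw [hq0.2] at this
        exact List.eq_nil_of_length_eq_zero this.symm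
      rw [if_pos hq0, if_pos ⟨hq0.1, hrel⟩]
    · have hwr : w.isEmpty = rel.isEmpty := by
        have := hperm.length_eq
        cases w <;> cases rel <;> simp_all
      have hrne : ¬(q = [] ∧ rel = []) := by
        intro hcon
        refine hq0 ⟨hcon.1, ?_⟩
        have := hperm.length_eq
        rw [hcon.2] at this
        exact List.eq_nil_of_length_eq_zero this
      rw [if_neg hq0, if_neg hrne, hwr]
      have hperm1 : (List.foldl (fun h j => pvHeapPush (pvToPair j) h) w
          (q.takeWhile (fun j => decide (PySem.List.pyGetD j 0 0 ≤ pvT1 q rel.isEmpty t)))).Perm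
          (rel ++ (q.takeWhile (fun j => decide (PySem.List.pyGetD j 0 0 ≤ pvT1 q rel.isEmpty t))).map pvToPair) :=
        (pvFoldPush_perm _ w).trans (hperm.append_right _)
      have hp1 := pvFoldPush_pairwise
        (q.takeWhile (fun j => decide (PySem.List.pyGetD j 0 0 ≤ pvT1 q rel.isEmpty t))) hp
      split <;> split
      · rfl
      · rename_i hw1 c cs hr1
        exfalso; rw [hw1, hr1] at hperm1
        have := hperm1.length_eq; simp at this
      · rename_i p w2 hw1 hr1
        exfalso; rw [hw1, hr1] at hperm1
        have := hperm1.length_eq; simp at this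
      · rename_i p w2 hw1 c cs hr1
        rw [hw1] at hperm1 hp1
        rw [hr1] at hperm1
        have hperm1' : (p :: w2).Perm ((pvExtractMin (c :: cs)).1 :: (pvExtractMin (c :: cs)).2) :=
          hperm1.trans (pvExtractMin_perm c cs).symm
        have hpm : p = (pvExtractMin (c :: cs)).1 := by
          refine pvHLe_antisymm ?_ ?_
          · have hmem : (pvExtractMin (c :: cs)).1 ∈ p :: w2 :=
              hperm1'.symm.subset List.mem_cons_self
            rcases List.mem_cons.mp hmem with h | h
            · rw [h]; exact pvHLe_refl _
            · exact (List.pairwise_cons.mp hp1).1 _ h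
          · exact pvExtractMin_min c cs p (hperm1.subset List.mem_cons_self)
        have hperm2 : w2.Perm (pvExtractMin (c :: cs)).2 := by
          rw [hpm] at hperm1'
          exact hperm1'.cons_inv
        have hp2 : w2.Pairwise (fun x y => pvHLe x y = true) := hp1.of_cons
        have hlen : (q.dropWhile (fun j => decide (PySem.List.pyGetD j 0 0 ≤ pvT1 q rel.isEmpty t))).length
            + w2.length < n := by
          have h1 := pvFoldPush_length
            (q.takeWhile (fun j => decide (PySem.List.pyGetD j 0 0 ≤ pvT1 q rel.isEmpty t))) w
          rw [hw1] at h1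
          simp only [List.length_cons] at h1
          have h2 := pvTakeDrop_length
            (fun j => decide (PySem.List.pyGetD j 0 0 ≤ pvT1 q rel.isEmpty t)) q
          omega
        rw [hpm]
        exact IH _ hlen _ _ _ _ _ rfl hp2 hperm2

-- ===== VERDICT (by name: the statement is the Claim_ definition above) =====
theorem solution_spec : Claim_equal_solution := by
  intro jobs _ _
  unfold Spec_solution solution solution_alt
  exact congrArg (fun x => PySem.Int.floordiv x (PySem.List.len jobs))
    (pvLoop_eq _ _ _ _ _ _ rfl List.Pairwise.nil (List.Perm.refl _))
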